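-- pv_equiv track=rewrite | github.com/azvero/domoticz-hive | plugin.py | find_key_in_list
-- ===== SOURCE A (Python) =====
-- def find_key_in_list(d, value):
--     if isinstance(d, list):
--         t = list(d)
--         for v in d:
--             if isinstance(v, dict):
--                 p = find_key(v, value)
--                 if not p:
--                     t.remove(v)
--         return t
--
-- def find_key(d, value):
--     for (k, v) in d.items():
--         if isinstance(v, dict):
--             p = find_key(v, value)
--             if p:
--                 return [k] + p
--         elif v == value:
--             return [k]
-- ===== SOURCE B (Python) =====
-- def find_key_in_list(d, value):
--     if not isinstance(d, list):
--         return None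
--     result = []
--     for item in d:
--         if not isinstance(item, dict):
--             result.append(item)
--             continue
--         stack = [item]
--         found = False
--         while stack and not found:
--             cur = stack.pop()
--             for v in cur.values():
--                 if isinstance(v, dict):
--                     stack.append(v)
--                 elif v == value:
--                     found = True
--                     break
--         if found:
--             result.append(item)
--     return result
-- ===== Notes on version B (the rewrite author's own statement) =====
-- stated objective: simpler
-- what changed: B appends matching elements to a fresh result list, deciding membership with an iterative explicit-stack DFS over each dict's values, instead of A's copy-then-remove loop calling the recursive find_key; this removes the quadratic list.remove scans.
import Mathlib
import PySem

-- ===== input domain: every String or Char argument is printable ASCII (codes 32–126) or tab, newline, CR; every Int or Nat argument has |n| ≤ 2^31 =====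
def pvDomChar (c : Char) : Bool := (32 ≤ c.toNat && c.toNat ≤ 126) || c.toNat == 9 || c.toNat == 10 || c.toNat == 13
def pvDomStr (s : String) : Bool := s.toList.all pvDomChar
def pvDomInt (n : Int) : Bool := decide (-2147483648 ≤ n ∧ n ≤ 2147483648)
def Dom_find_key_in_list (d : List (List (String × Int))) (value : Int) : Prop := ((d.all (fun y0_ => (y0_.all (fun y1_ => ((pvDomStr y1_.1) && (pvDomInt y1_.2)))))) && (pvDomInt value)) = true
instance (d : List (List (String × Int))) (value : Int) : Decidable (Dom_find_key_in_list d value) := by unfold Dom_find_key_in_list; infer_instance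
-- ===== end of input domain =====

-- B filters with an iterative stack DFS into a fresh list instead of A's copy-then-remove loop
-- over the recursive find_key; the dicts here hold only Int values, so the nested-dict branches
-- of both Pythons are vacuous at this type (noted at each port).

-- ===== PORT A =====
-- A dict[str,int] arrives as an association list; Python's dict collapses duplicate keys
-- (first position, last value), which PySem.Dict.ofList reproduces.
def dItems (v : List (String × Int)) : List (String × Int) := (PySem.Dict.ofList v).items

-- find_key: values are Int, never dicts, so the isinstance(v, dict) recursion branch never fires.
def findKeyA (value : Int) : List (String × Int) → Option (List String)
  | [] => none
  | (k, w) :: rest => if w == value then some [k] else findKeyA value rest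

-- t.remove(v): drop the first element Python-== to v; Python would raise ValueError on a miss,
-- which cannot happen in A's loop (proved via the invariant below), so the [] case is unreachable.
def removeFirst (eq : List (String × Int) → Bool) : List (List (String × Int)) → List (List (String × Int))
  | [] => []
  | x :: rest => if eq x then rest else x :: removeFirst eq rest

-- Python's dict ==: same key→value mapping, order-insensitive; on items lists (unique keys)
-- that is pair-set equality.
def dictEqPy (v w : List (String × Int)) : Bool :=
  (dItems v).all (fun p => decide (p ∈ dItems w)) && (dItems w).all (fun p => decide (p ∈ dItems v))

def find_key_in_list (d : List (List (String × Int))) (value : Int) : List (List (String × Int)) :=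
  d.foldl (fun t v => if (findKeyA value (dItems v)).isSome then t else removeFirst (dictEqPy v) t) d

-- ===== PORT B =====
-- B's while-stack loop; values are Int, never dicts, so nothing is ever pushed onto the stack.
def hasValueB (value : Int) : List (List (String × Int)) → Bool
  | [] => false
  | cur :: stack =>
    if ((PySem.Dict.ofList cur).values.any (fun w => w == value)) then true
    else hasValueB value stack

def find_key_in_list_alt (d : List (List (String × Int))) (value : Int) : List (List (String × Int)) :=
  d.foldl (fun result item => if hasValueB value [item] then result ++ [item] else result) []

-- ===== PRECONDITION & SPEC =====
def Spec_find_key_in_list (d : List (List (String × Int))) (value : Int) (out : List (List (String × Int))) : Prop := out = find_key_in_list_alt d value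
instance (d : List (List (String × Int))) (value : Int) (out : List (List (String × Int))) : Decidable (Spec_find_key_in_list d value out) := by unfold Spec_find_key_in_list; infer_instance

-- ===== CLAIM (what is proved, stated in full; the proofs are below) =====
def Claim_equal_find_key_in_list : Prop := ∀ (d : List (List (String × Int))) (value : Int), Dom_find_key_in_list d value → Spec_find_key_in_list d value (find_key_in_list d value)

-- ===== LEMMAS AND PROOFS =====

-- the predicate both sides filter by
def keepP (value : Int) (v : List (String × Int)) : Bool := (dItems v).any (fun p => p.2 == value)

lemma findKeyA_isSome (value : Int) (l : List (String × Int)) :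
    (findKeyA value l).isSome = l.any (fun p => p.2 == value) := by
  induction l with
  | nil => rfl
  | cons p rest ih =>
    obtain ⟨k, w⟩ := p
    by_cases h : w == value <;> simp [findKeyA, h, ih]

lemma hasValueB_single (value : Int) (v : List (String × Int)) :
    hasValueB value [v] = keepP value v := by
  have hv : (PySem.Dict.ofList v).values.any (fun w => w == value) = keepP value v := by
    simp only [keepP, dItems, PySem.Dict.values, List.any_map]; rfl
  cases h : keepP value v <;> simp [hasValueB, hv, h]

lemma dictEqPy_refl (v : List (String × Int)) : dictEqPy v v = true := by
  simp [dictEqPy]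

lemma keepP_of_dictEqPy {v w : List (String × Int)} (value : Int) (h : dictEqPy v w = true) :
    keepP value v = keepP value w := by
  simp only [dictEqPy, Bool.and_eq_true, List.all_eq_true, decide_eq_true_eq] at h
  obtain ⟨h1, h2⟩ := h
  simp only [keepP]
  cases hb : (dItems w).any (fun p => p.2 == value) <;>
    simp only [List.any_eq_true, List.any_eq_false] at hb ⊢
  · intro p hp; exact hb p (h1 p hp)
  · obtain ⟨p, hp, hq⟩ := hb; exact ⟨p, h2 p hp, hq⟩

lemma removeFirst_append {eq : List (String × Int) → Bool} {acc l : List (List (String × Int))}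
    (h : ∀ x ∈ acc, eq x = false) :
    removeFirst eq (acc ++ l) = acc ++ removeFirst eq l := by
  induction acc with
  | nil => rfl
  | cons a rest ih =>
    have ha := h a (by simp)
    simp only [List.cons_append, removeFirst, ha, Bool.false_eq_true, if_false]
    rw [ih (fun x hx => h x (List.mem_cons_of_mem _ hx))]

lemma loopA (value : Int) (rest acc : List (List (String × Int)))
    (hacc : ∀ x ∈ acc, keepP value x = true) :
    rest.foldl (fun t v => if (findKeyA value (dItems v)).isSome then t else removeFirst (dictEqPy v) t) (acc ++ rest)
      = acc ++ rest.filter (keepP value) := by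
  induction rest generalizing acc with
  | nil => simp
  | cons v rest' ih =>
    have hfk : (findKeyA value (dItems v)).isSome = keepP value v :=
      findKeyA_isSome value (dItems v)
    rw [List.foldl_cons, hfk]
    by_cases hv : keepP value v = true
    · rw [hv, if_pos rfl, show acc ++ v :: rest' = (acc ++ [v]) ++ rest' by simp,
        ih (acc ++ [v]) ?_]
      · simp [hv]
      · intro x hx
        rcases List.mem_append.mp hx with h | h
        · exact hacc x h
        · rw [List.mem_singleton.mp h]; exact hv
    · rw [if_neg (by simp [hv])]
      have hrm : removeFirst (dictEqPy v) (acc ++ v :: rest') = acc ++ rest' := by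
        rw [removeFirst_append ?_]
        · simp [removeFirst, dictEqPy_refl]
        · intro x hx
          cases hdx : dictEqPy v x with
          | false => rfl
          | true =>
            exact absurd ((keepP_of_dictEqPy value hdx).trans (hacc x hx)) hv
      rw [hrm, ih acc hacc]
      simp [hv]

lemma altB (value : Int) (d : List (List (String × Int))) :
    find_key_in_list_alt d value = d.filter (keepP value) := by
  unfold find_key_in_list_alt
  induction d using List.reverseRecOn with
  | nil => rfl
  | append_singleton l x ih =>
    rw [List.foldl_append, List.foldl_cons, List.foldl_nil, ih, List.filter_append]
    by_cases h : keepP value x = true <;> simp [hasValueB_single, h]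

-- ===== VERDICT (by name: the statement is the Claim_ definition above) =====
theorem find_key_in_list_spec : Claim_equal_find_key_in_list := by
  intro d value _
  unfold Spec_find_key_in_list find_key_in_list
  rw [altB]
  simpa using loopA value d [] (by simp)
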